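-- pv_equiv track=rewrite | github.com/MozillaSecurity/funfuzz | src/funfuzz/js/loopjsfunfuzz.py | mightUseDivision
-- ===== SOURCE A (Python) =====
-- def mightUseDivision(code):
--     # Work around MSVC division inconsistencies (bug 948321)
--     # by leaving division out of *-cj-in.js files on Windows.
--     # (Unfortunately, this will also match regexps and a bunch
--     # of other things.)
--     i = 0
--     while i < len(code):
--         if code[i] == '/':
--             if i + 1 < len(code) and (code[i + 1] == '/' or code[i + 1] == '*'):
--                 # An open-comment like "//" or "/*" is okay. Skip the next character.
--                 i += 1
--             elif i and code[i - 1] == '*':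
--                 # A close-comment like "*/" is okay too.
--                 pass
--             else:
--                 # Plain "/" could be division (or regexp or something else)
--                 return True
--         i += 1
--     return False
-- ===== SOURCE B (Python) =====
-- # Idiomatic rewrite: one compiled regex scanned with re.finditer; ordered alternation
-- # mirrors the original's branch priority ('//' and '/*' openers consume two chars,
-- # a '/' right after '*' is a safe close-comment, a bare '/' captures => division).
-- import re
--
-- _DIVISION_RE = re.compile(r'//|/\*|(?<=\*)/|(/)')
--
-- def mightUseDivision(code):
--     return any(m.group(1) is not None for m in _DIVISION_RE.finditer(code))
-- ===== Notes on version B (the rewrite author's own statement) =====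
-- stated objective: idiomatic
-- what changed: Replaced the manual index loop with lookahead/lookbehind subscripting by a single compiled regex r'//|/\*|(?<=\*)/|(/)' scanned with re.finditer, whose ordered alternation and non-overlapping consumption reproduce the branch priority and the two-character skip; True iff some match captures the bare-slash group.
import Mathlib
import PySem

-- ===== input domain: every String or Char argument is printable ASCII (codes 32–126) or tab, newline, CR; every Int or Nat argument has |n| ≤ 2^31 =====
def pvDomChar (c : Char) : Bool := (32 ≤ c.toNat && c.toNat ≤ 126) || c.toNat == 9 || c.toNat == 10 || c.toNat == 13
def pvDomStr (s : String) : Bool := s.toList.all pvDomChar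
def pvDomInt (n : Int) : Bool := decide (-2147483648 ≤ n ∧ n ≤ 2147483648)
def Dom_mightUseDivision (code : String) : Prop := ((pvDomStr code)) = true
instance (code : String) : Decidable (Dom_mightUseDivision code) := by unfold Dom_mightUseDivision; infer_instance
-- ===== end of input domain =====

-- B replaces A's manual index loop by a regex-engine scan (re.finditer over an ordered
-- alternation); idiomatic rewrite, same cost. The Lean port of B hand-ports the regex
-- scan for this fixed pattern, which is exact on the whole domain.


-- ===== PORT A =====
-- A's while loop over index i; the Nat fuel (initially the string length, an upper
-- bound on the number of iterations since i strictly increases) only makes the loop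
-- structurally recursive, it never cuts a computation short. Python's short-circuit
-- 'and'/'or' are Bool && / ||.
def mightUseDivisionLoopA (xs : List Char) (i : Nat) : Nat → Bool
  | 0 => false
  | fuel + 1 =>
    if i < xs.length then
      if xs[i]? == some '/' then
        if decide (i + 1 < xs.length) && (xs[i+1]? == some '/' || xs[i+1]? == some '*') then
          -- open-comment like "//" or "/*": skip the next character (i += 1, then i += 1)
          mightUseDivisionLoopA xs (i + 2) fuel
        else if (i != 0) && (xs[i-1]? == some '*') then
          -- close-comment "*/": pass
          mightUseDivisionLoopA xs (i + 1) fuel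
        else true
      else mightUseDivisionLoopA xs (i + 1) fuel
    else false

def mightUseDivision (code : String) : Bool :=
  mightUseDivisionLoopA code.toList 0 code.toList.length

-- ===== PORT B =====
-- Hand-port of re.finditer over the compiled pattern r'//|/\*|(?<=\*)/|(/)', split the
-- way a regex engine works: reTryAt tries the alternatives IN ORDER at one position and
-- returns (end of match, did the capturing group '(/)' match); the driver below consumes
-- non-overlapping matches left to right, advancing one position where nothing matches,
-- and B is true iff some match captured. Exact for this fixed pattern on all inputs
-- (the lookbehind reads the ORIGINAL string, as in Python's re). The Nat fuel only
-- makes the scan structurally recursive (positions strictly increase).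
def reTryAt (xs : List Char) (i : Nat) : Option (Nat × Bool) :=
  if xs[i]? == some '/' then
    if xs[i+1]? == some '/' then some (i + 2, false)        -- alternative '//'
    else if xs[i+1]? == some '*' then some (i + 2, false)   -- alternative '/\*'
    else if (i != 0) && (xs[i-1]? == some '*') then some (i + 1, false)  -- '(?<=\*)/'
    else some (i + 1, true)                                 -- capturing '(/)'
  else none

def reFinditerCaptures (xs : List Char) (i : Nat) : Nat → Bool
  | 0 => false
  | fuel + 1 =>
    if i < xs.length then
      match reTryAt xs i with
      | some (_, true) => true                                  -- the group '(/)' matched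
      | some (j, false) => reFinditerCaptures xs j fuel         -- safe match, scan on after it
      | none => reFinditerCaptures xs (i + 1) fuel              -- no match here, scan on
    else false

def mightUseDivision_alt (code : String) : Bool :=
  reFinditerCaptures code.toList 0 code.toList.length

-- ===== PRECONDITION & SPEC =====
def Spec_mightUseDivision (code : String) (out : Bool) : Prop := out = mightUseDivision_alt code
instance (code : String) (out : Bool) : Decidable (Spec_mightUseDivision code out) := by unfold Spec_mightUseDivision; infer_instance

-- ===== CLAIM (what is proved, stated in full; the proofs are below) =====
def Claim_equal_mightUseDivision : Prop := ∀ (code : String), Dom_mightUseDivision code → Spec_mightUseDivision code (mightUseDivision code)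

-- ===== LEMMAS AND PROOFS =====

theorem loopA_eq_scanB (xs : List Char) (fA : Nat) :
    ∀ (i fB : Nat), xs.length - i ≤ fA → xs.length - i ≤ fB →
      mightUseDivisionLoopA xs i fA = reFinditerCaptures xs i fB := by
  induction fA with
  | zero =>
    intro i fB hA _
    have h : ¬ i < xs.length := by omega
    cases fB with
    | zero => rfl
    | succ fB => rw [mightUseDivisionLoopA, reFinditerCaptures, if_neg h]
  | succ fA ih =>
    intro i fB hA hB
    by_cases h : i < xs.length
    · obtain ⟨fB, rfl⟩ : ∃ fB', fB = fB' + 1 := by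
        cases fB with
        | zero => omega
        | succ fB' => exact ⟨fB', rfl⟩
      have hgi : xs[i]? = some xs[i] := List.getElem?_eq_getElem h
      rw [mightUseDivisionLoopA, reFinditerCaptures, if_pos h, if_pos h]
      by_cases hc : xs[i] = '/'
      · rw [if_pos (by simp [hgi, hc])]
        by_cases hn : xs[i+1]? = some '/' ∨ xs[i+1]? = some '*'
        · have h1 : i + 1 < xs.length := by
            rcases hn with hn | hn <;>
              · rcases List.getElem?_eq_some_iff.mp hn with ⟨hl, _⟩; exact hl
          rw [if_pos (by rcases hn with hn | hn <;> (rw [hn]; simp [h1]))]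
          have hm : reTryAt xs i = some (i + 2, false) := by
            unfold reTryAt
            rcases hn with hn | hn
            · rw [if_pos (by simp [hgi, hc]), if_pos (by simp [hn])]
            · by_cases hn2 : xs[i+1]? = some '/'
              · rw [if_pos (by simp [hgi, hc]), if_pos (by simp [hn2])]
              · rw [if_pos (by simp [hgi, hc]), if_neg (by simp [hn2]), if_pos (by simp [hn])]
          rw [hm]
          exact ih (i + 2) fB (by omega) (by omega)
        · rw [not_or] at hn
          rw [if_neg (by simp [hn.1, hn.2])]
          by_cases hp : i ≠ 0 ∧ xs[i-1]? = some '*'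
          · have hm : reTryAt xs i = some (i + 1, false) := by
              unfold reTryAt
              rw [if_pos (by simp [hgi, hc]), if_neg (by simp [hn.1]), if_neg (by simp [hn.2]),
                if_pos (by simp [hp.1, hp.2])]
            rw [if_pos (by simp [hp.1, hp.2]), hm]
            exact ih (i + 1) fB (by omega) (by omega)
          · have hm : reTryAt xs i = some (i + 1, true) := by
              unfold reTryAt
              rw [if_pos (by simp [hgi, hc]), if_neg (by simp [hn.1]), if_neg (by simp [hn.2]),
                if_neg (by simp; intro h0; by_contra hs; exact hp ⟨h0, by simpa using hs⟩)]
            rw [if_neg (by simp; intro h0; by_contra hs; exact hp ⟨h0, by simpa using hs⟩), hm]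
      · rw [if_neg (by simp [hgi, hc])]
        have hm : reTryAt xs i = none := by
          unfold reTryAt
          rw [if_neg (by simp [hgi, hc])]
        rw [hm]
        exact ih (i + 1) fB (by omega) (by omega)
    · obtain ⟨fB', rfl⟩ | rfl : (∃ fB', fB = fB' + 1) ∨ fB = 0 := by
        cases fB with
        | zero => exact Or.inr rfl
        | succ fB' => exact Or.inl ⟨fB', rfl⟩
      · rw [mightUseDivisionLoopA, reFinditerCaptures, if_neg h, if_neg h]
      · rw [mightUseDivisionLoopA, reFinditerCaptures, if_neg h]

-- ===== VERDICT (by name: the statement is the Claim_ definition above) =====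
theorem mightUseDivision_spec : Claim_equal_mightUseDivision := by
  intro code _
  unfold Spec_mightUseDivision mightUseDivision mightUseDivision_alt
  exact loopA_eq_scanB code.toList code.toList.length 0 code.toList.length
    (by omega) (by omega)
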